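-- pv_equiv track=rewrite | github.com/llanahp/IngenieriaInformaticaUAH | 2/Algoritmia y Complejidad/tema3/lopezLlana.Raul_PL3/MrScrooge.py | rellenarBolsa
-- ===== SOURCE A (Python) =====
-- Nmonedas=38
--
-- def rellenarBolsa(bolsa,PesoReales,PesoFalsa,PosicionFalsa):
--     for i in range(1, Nmonedas + 1):
--         '''Posición de la moneda falsa'''
--         if(i==PosicionFalsa):
--             '''Peso moneda falsa'''
--             bolsa.append(PesoFalsa)
--         else:
--             '''Peso monedas reales'''
--             bolsa.append(PesoReales)
--
--
--     return bolsa
-- ===== SOURCE B (Python) =====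
-- Nmonedas = 38
--
-- def rellenarBolsa(bolsa, PesoReales, PesoFalsa, PosicionFalsa):
--     # Build-then-patch: extend with a uniform block, then overwrite the fake slot.
--     start = len(bolsa)
--     bolsa.extend([PesoReales] * Nmonedas)
--     if 1 <= PosicionFalsa <= Nmonedas:
--         bolsa[start + PosicionFalsa - 1] = PesoFalsa
--     return bolsa
-- ===== Notes on version B (the rewrite author's own statement) =====
-- stated objective: simpler
-- what changed: Replaces the per-iteration branch inside the append loop by a build-then-patch decomposition: extend with 38 copies of PesoReales at once, then overwrite the single fake slot when 1 <= PosicionFalsa <= 38.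
import Mathlib
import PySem

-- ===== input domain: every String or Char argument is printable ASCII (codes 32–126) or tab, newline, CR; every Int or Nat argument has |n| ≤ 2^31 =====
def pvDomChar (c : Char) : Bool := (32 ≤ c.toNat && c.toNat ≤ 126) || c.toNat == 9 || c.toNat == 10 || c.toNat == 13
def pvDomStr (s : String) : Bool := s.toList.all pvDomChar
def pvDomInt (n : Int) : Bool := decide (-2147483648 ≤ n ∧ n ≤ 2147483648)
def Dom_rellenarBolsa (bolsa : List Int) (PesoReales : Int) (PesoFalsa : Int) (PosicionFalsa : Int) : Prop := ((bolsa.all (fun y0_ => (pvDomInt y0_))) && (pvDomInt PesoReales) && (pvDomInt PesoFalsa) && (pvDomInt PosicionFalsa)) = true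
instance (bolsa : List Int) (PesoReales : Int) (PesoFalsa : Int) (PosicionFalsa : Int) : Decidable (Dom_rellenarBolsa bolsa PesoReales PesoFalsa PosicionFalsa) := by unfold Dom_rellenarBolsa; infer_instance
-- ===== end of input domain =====

-- ===== PORT A =====
-- Header: B builds the uniform 38-coin block at once and then patches the single fake slot;
-- objective: simpler. Both Pythons mutate `bolsa` in place identically (extend/append); the
-- equivalence proved here is about the returned list, which is also the mutated list.
def rellenarBolsa (bolsa : List Int) (PesoReales : Int) (PesoFalsa : Int) (PosicionFalsa : Int) : List Int :=
  (PySem.List.pyRange 1 (38 + 1) 1).foldl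
    (fun acc i => if i == PosicionFalsa then acc ++ [PesoFalsa] else acc ++ [PesoReales]) bolsa

-- ===== PORT B =====
def rellenarBolsa_alt (bolsa : List Int) (PesoReales : Int) (PesoFalsa : Int) (PosicionFalsa : Int) : List Int :=
  let start : Int := bolsa.length
  let filled := bolsa ++ List.replicate 38 PesoReales
  if 1 ≤ PosicionFalsa ∧ PosicionFalsa ≤ 38 then
    filled.set (start + PosicionFalsa - 1).toNat PesoFalsa
  else filled

-- ===== PRECONDITION & SPEC =====
def Spec_rellenarBolsa (bolsa : List Int) (PesoReales : Int) (PesoFalsa : Int) (PosicionFalsa : Int) (out : List Int) : Prop := out = rellenarBolsa_alt bolsa PesoReales PesoFalsa PosicionFalsa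
instance (bolsa : List Int) (PesoReales : Int) (PesoFalsa : Int) (PosicionFalsa : Int) (out : List Int) : Decidable (Spec_rellenarBolsa bolsa PesoReales PesoFalsa PosicionFalsa out) := by unfold Spec_rellenarBolsa; infer_instance

-- ===== CLAIM (what is proved, stated in full; the proofs are below) =====
def Claim_equal_rellenarBolsa : Prop := ∀ (bolsa : List Int) (PesoReales : Int) (PesoFalsa : Int) (PosicionFalsa : Int), Dom_rellenarBolsa bolsa PesoReales PesoFalsa PosicionFalsa → Spec_rellenarBolsa bolsa PesoReales PesoFalsa PosicionFalsa (rellenarBolsa bolsa PesoReales PesoFalsa PosicionFalsa)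

-- ===== LEMMAS AND PROOFS =====

-- ===== VERDICT (by name: the statement is the Claim_ definition above) =====
lemma set_append_len_add (xs ys : List Int) (k : Nat) (a : Int) :
    (xs ++ ys).set (xs.length + k) a = xs ++ ys.set k a := by
  induction xs with
  | nil => simp
  | cons x xs ih => simp [Nat.succ_add, ih]

lemma map_body_of_lt (P F R : Int) (h : P < 1 ∨ 38 < P) :
    (PySem.List.pyRange 1 39 1).map (fun i => if i == P then F else R)
      = List.replicate 38 R := by
  rw [List.eq_replicate_iff]
  constructor
  · simp
  · intro b hb
    simp only [List.mem_map] at hb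
    obtain ⟨x, hx, rfl⟩ := hb
    rw [PySem.List.mem_pyRange_one] at hx
    rw [if_neg]
    simp only [beq_iff_eq]
    omega

lemma map_body_of_mem (P F R : Int) (h1 : 1 ≤ P) (h2 : P ≤ 38) :
    (PySem.List.pyRange 1 39 1).map (fun i => if i == P then F else R)
      = (List.replicate 38 R).set (P - 1).toNat F := by
  apply List.ext_getElem
  · simp
  · intro i hi hi'
    simp only [List.length_map, PySem.List.length_pyRange_one] at hi
    have hi38 : i < 38 := by omega
    rw [List.getElem_map, PySem.List.getElem_pyRange_one, List.getElem_set]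
    by_cases hc : (P - 1).toNat = i
    · rw [if_pos hc, if_pos]
      simp only [beq_iff_eq]; omega
    · rw [if_neg hc, if_neg, List.getElem_replicate]
      simp only [beq_iff_eq]; omega

theorem rellenarBolsa_spec : Claim_equal_rellenarBolsa := by
  intro bolsa R F P _
  unfold Spec_rellenarBolsa rellenarBolsa rellenarBolsa_alt
  have hfold : (PySem.List.pyRange 1 (38 + 1) 1).foldl
      (fun acc i => if i == P then acc ++ [F] else acc ++ [R]) bolsa
      = bolsa ++ (PySem.List.pyRange 1 39 1).map (fun i => if i == P then F else R) := by
    have hfun : (fun (acc : List Int) i => if i == P then acc ++ [F] else acc ++ [R])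
        = (fun acc i => acc ++ [if i == P then F else R]) := by
      funext acc i; by_cases h : i == P <;> simp [h]
    rw [hfun, PySem.List.foldl_append_singleton_eq_map]
    norm_num
  rw [hfold]
  by_cases h : 1 ≤ P ∧ P ≤ 38
  · rw [if_pos h, map_body_of_mem P F R h.1 h.2]
    have hidx : ((bolsa.length : Int) + P - 1).toNat = bolsa.length + (P - 1).toNat := by omega
    rw [hidx, set_append_len_add]
  · rw [if_neg h, map_body_of_lt P F R (by omega)]
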